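-- pv_equiv track=rewrite | github.com/MukundaKatta/ChartMind | src/chartmind/utils.py | match_chart_type
-- ===== SOURCE A (Python) =====
-- def match_chart_type(query: str, patterns: dict[str, list[str]]) -> str:
--     """Return the best-matching chart type from keyword patterns.
--
--     Tries longer patterns first so "bar chart" beats "bar".
--     Falls back to "bar" if nothing matches.
--     """
--     best_type = "bar"
--     best_len = 0
--     for chart_type, keywords in patterns.items():
--         sorted_kw = sorted(keywords, key=len, reverse=True)
--         for kw in sorted_kw:
--             if kw in query and len(kw) > best_len:
--                 best_type = chart_type
--                 best_len = len(kw)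
--     return best_type
-- ===== SOURCE B (Python) =====
-- def match_chart_type(query: str, patterns: dict[str, list[str]]) -> str:
--     """Two-pass re-implementation: compute the longest matching keyword length,
--     then return the first chart type that attains it."""
--     lens = [len(kw) for kws in patterns.values() for kw in kws if kw in query]
--     m = max(lens, default=0)
--     if m == 0:
--         return "bar"
--     for chart_type, keywords in patterns.items():
--         if any(kw in query and len(kw) == m for kw in keywords):
--             return chart_type
--     return "bar"
-- ===== Notes on version B (the rewrite author's own statement) =====
-- stated objective: alternative
-- what changed: Replaces A's nested running-best accumulation (with a per-type sort of the keywords) by two plain passes: first compute the maximal length of a keyword that substring-matches the query, then return the first chart type that attains it ('bar' if none).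
import Mathlib
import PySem

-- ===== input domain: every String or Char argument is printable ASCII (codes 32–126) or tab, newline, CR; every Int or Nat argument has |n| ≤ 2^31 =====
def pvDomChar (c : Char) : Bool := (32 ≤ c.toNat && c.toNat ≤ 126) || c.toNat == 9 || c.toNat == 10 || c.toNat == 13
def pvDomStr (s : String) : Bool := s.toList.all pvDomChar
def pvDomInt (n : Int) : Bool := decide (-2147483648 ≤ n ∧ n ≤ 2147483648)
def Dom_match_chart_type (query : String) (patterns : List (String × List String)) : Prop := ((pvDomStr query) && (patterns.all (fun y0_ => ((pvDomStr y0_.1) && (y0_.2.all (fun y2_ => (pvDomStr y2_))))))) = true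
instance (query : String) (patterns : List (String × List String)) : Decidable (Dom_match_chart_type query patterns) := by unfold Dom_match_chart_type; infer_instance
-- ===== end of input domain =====

-- B replaces A's nested running-best accumulation (with a per-type sort) by two plain passes:
-- compute the maximal matching keyword length, then return the first chart type attaining it
-- (objective: alternative decomposition, same exact return value).

-- ===== PORT A =====
-- Literal transliteration of A: running best (best_type, best_len), inner loop over
-- sorted(keywords, key=len, reverse=True), update when 'kw in query and len(kw) > best_len'.
def match_chart_type (query : String) (patterns : List (String × List String)) : String :=
  (patterns.foldl
    (fun (st : String × Int) tk =>
      (PySem.List.sorted tk.2 (fun kw => PySem.Str.len kw) true).foldl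
        (fun st kw =>
          if PySem.Str.isIn kw query && decide (st.2 < PySem.Str.len kw) then
            (tk.1, PySem.Str.len kw)
          else st)
        st)
    ("bar", 0)).1

-- ===== PORT B =====
-- Pass 1 of Source B: the list comprehension of lengths of matching keywords.
def mctLens (query : String) (patterns : List (String × List String)) : List Int :=
  patterns.flatMap (fun tk =>
    (tk.2.filter (fun kw => PySem.Str.isIn kw query)).map (fun kw => PySem.Str.len kw))

-- Pass 2 of Source B: the for-loop returning the first chart type with a matching keyword of length m.
def mctFind (query : String) (m : Int) : List (String × List String) → String
  | [] => "bar"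
  | tk :: rest =>
      if tk.2.any (fun kw => PySem.Str.isIn kw query && decide (PySem.Str.len kw = m)) then tk.1
      else mctFind query m rest

def match_chart_type_alt (query : String) (patterns : List (String × List String)) : String :=
  let m := PySem.List.maxD (mctLens query patterns) (fun x => x) 0
  if m = 0 then "bar" else mctFind query m patterns

-- ===== PRECONDITION & SPEC =====
def Spec_match_chart_type (query : String) (patterns : List (String × List String)) (out : String) : Prop := out = match_chart_type_alt query patterns
instance (query : String) (patterns : List (String × List String)) (out : String) : Decidable (Spec_match_chart_type query patterns out) := by unfold Spec_match_chart_type; infer_instance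

-- ===== CLAIM (what is proved, stated in full; the proofs are below) =====
def Claim_equal_match_chart_type : Prop := ∀ (query : String) (patterns : List (String × List String)), Dom_match_chart_type query patterns → Spec_match_chart_type query patterns (match_chart_type query patterns)

-- ===== LEMMAS AND PROOFS =====

-- the maximal length of a keyword of kws that matches query (0 if none)
def mctMM (query : String) (kws : List String) : Int :=
  ((kws.filter (fun kw => PySem.Str.isIn kw query)).map (fun kw => PySem.Str.len kw)).foldl max 0

lemma mct_len_nonneg (s : String) : 0 ≤ PySem.Str.len s := by
  simp [PySem.Str.len_eq]

lemma mctMM_nonneg (q : String) (kws : List String) : 0 ≤ mctMM q kws :=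
  (PySem.List.le_foldl_max _ 0).1

lemma mctMM_nil (q : String) : mctMM q [] = 0 := rfl

lemma mctMM_cons (q : String) (kw : String) (kws : List String) :
    mctMM q (kw :: kws) =
      if PySem.Str.isIn kw q then max (PySem.Str.len kw) (mctMM q kws) else mctMM q kws := by
  unfold mctMM
  rw [List.filter_cons]
  by_cases h : PySem.Str.isIn kw q
  · rw [if_pos h, if_pos h, List.map_cons, List.foldl_cons,
      show max 0 (PySem.Str.len kw) = max (PySem.Str.len kw) 0 from max_comm _ _,
      List.foldl_assoc]
  · rw [if_neg h, if_neg h]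

lemma mctMM_perm (q : String) {l1 l2 : List String} (h : l1.Perm l2) :
    mctMM q l1 = mctMM q l2 := by
  unfold mctMM
  exact List.Perm.foldl_op_eq ((h.filter _).map _)

-- the inner loop of A over any keyword list, from any state with nonnegative best length
lemma mct_inner (q t : String) (l : List String) : ∀ (bt : String) (bl : Int), 0 ≤ bl →
    l.foldl
      (fun (st : String × Int) kw =>
        if PySem.Str.isIn kw q && decide (st.2 < PySem.Str.len kw) then (t, PySem.Str.len kw)
        else st)
      (bt, bl)
    = if bl < mctMM q l then (t, mctMM q l) else (bt, bl) := by
  induction l with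
  | nil =>
    intro bt bl hbl
    rw [List.foldl_nil, mctMM_nil, if_neg (by omega)]
  | cons kw rest ih =>
    intro bt bl hbl
    rw [mctMM_cons]
    simp only [List.foldl_cons]
    by_cases hin : PySem.Str.isIn kw q
    · rw [if_pos hin]
      by_cases hlt : bl < PySem.Str.len kw
      · rw [if_pos (by simp only [Bool.and_eq_true, decide_eq_true_eq]; exact ⟨hin, hlt⟩)]
        rw [ih t (PySem.Str.len kw) (mct_len_nonneg kw)]
        have hr := mctMM_nonneg q rest
        by_cases hle : mctMM q rest ≤ PySem.Str.len kw
        · rw [if_neg (by omega), if_pos (by omega),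
            show max (PySem.Str.len kw) (mctMM q rest) = PySem.Str.len kw by omega]
        · rw [if_pos (by omega), if_pos (by omega),
            show max (PySem.Str.len kw) (mctMM q rest) = mctMM q rest by omega]
      · have hc : ¬ (PySem.Str.isIn kw q && decide (bl < PySem.Str.len kw)) = true := by
          simp only [Bool.and_eq_true, decide_eq_true_eq, not_and]
          exact fun _ => hlt
        rw [if_neg hc, ih bt bl hbl]
        by_cases hgt : bl < mctMM q rest
        · rw [if_pos hgt, if_pos (by omega),
            show max (PySem.Str.len kw) (mctMM q rest) = mctMM q rest by omega]
        · rw [if_neg hgt, if_neg (by omega)]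
    · rw [if_neg hin]
      simp only [hin, Bool.false_and, Bool.false_eq_true, if_false]
      exact ih bt bl hbl

-- a matching keyword's length never exceeds mctMM
lemma mct_any_le (q : String) (kws : List String) (v : Int)
    (h : kws.any (fun kw => PySem.Str.isIn kw q && decide (PySem.Str.len kw = v)) = true) :
    v ≤ mctMM q kws := by
  induction kws with
  | nil => simp at h
  | cons kw rest ih =>
    rw [mctMM_cons]
    simp only [List.any_cons, Bool.or_eq_true, Bool.and_eq_true, decide_eq_true_eq] at h
    rcases h with ⟨hin, hv⟩ | h
    · rw [if_pos hin]; omega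
    · have := ih h
      split_ifs with hin
      · omega
      · exact this

-- a nonzero mctMM is attained by some matching keyword
lemma mct_any_attained (q : String) (kws : List String) (h : mctMM q kws ≠ 0) :
    kws.any (fun kw => PySem.Str.isIn kw q && decide (PySem.Str.len kw = mctMM q kws)) = true := by
  induction kws with
  | nil => rw [mctMM_nil] at h; exact absurd rfl h
  | cons kw rest ih =>
    rw [mctMM_cons] at h ⊢
    by_cases hin : PySem.Str.isIn kw q
    · rw [if_pos hin] at h ⊢
      have hr := mctMM_nonneg q rest
      by_cases hle : mctMM q rest ≤ PySem.Str.len kw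
      · rw [show max (PySem.Str.len kw) (mctMM q rest) = PySem.Str.len kw by omega]
        simp only [List.any_cons, Bool.or_eq_true, Bool.and_eq_true, decide_eq_true_eq]
        exact Or.inl ⟨hin, trivial⟩
      · rw [show max (PySem.Str.len kw) (mctMM q rest) = mctMM q rest by omega] at h ⊢
        simp only [List.any_cons, Bool.or_eq_true]
        exact Or.inr (ih h)
    · rw [if_neg hin] at h ⊢
      simp only [List.any_cons, Bool.or_eq_true]
      exact Or.inr (ih h)

-- the global maximum over all pattern entries
def mctGM (query : String) (patterns : List (String × List String)) : Int :=
  (mctLens query patterns).foldl max 0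

lemma mctGM_nonneg (q : String) (pats : List (String × List String)) : 0 ≤ mctGM q pats :=
  (PySem.List.le_foldl_max _ 0).1

lemma mctGM_nil (q : String) : mctGM q [] = 0 := rfl

lemma mctGM_cons (q : String) (tk : String × List String) (rest : List (String × List String)) :
    mctGM q (tk :: rest) = max (mctMM q tk.2) (mctGM q rest) := by
  unfold mctGM mctLens
  rw [List.flatMap_cons, List.foldl_append,
    show ((tk.2.filter (fun kw => PySem.Str.isIn kw q)).map (fun kw => PySem.Str.len kw)).foldl
      max 0 = mctMM q tk.2 from rfl,
    show mctMM q tk.2 = max (mctMM q tk.2) 0 by have := mctMM_nonneg q tk.2; omega,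
    List.foldl_assoc]
  have := mctMM_nonneg q tk.2
  omega

lemma mctFind_cons (q : String) (m : Int) (tk : String × List String)
    (rest : List (String × List String)) :
    mctFind q m (tk :: rest) =
      if tk.2.any (fun kw => PySem.Str.isIn kw q && decide (PySem.Str.len kw = m)) then tk.1
      else mctFind q m rest := rfl

-- the outer loop of A, from any state with a nonnegative best length
lemma mct_outer (q : String) (pats : List (String × List String)) :
    ∀ (bt : String) (bl : Int), 0 ≤ bl →
    (pats.foldl
      (fun (st : String × Int) tk =>
        (PySem.List.sorted tk.2 (fun kw => PySem.Str.len kw) true).foldl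
          (fun st kw =>
            if PySem.Str.isIn kw q && decide (st.2 < PySem.Str.len kw) then (tk.1, PySem.Str.len kw)
            else st)
          st)
      (bt, bl)).1
    = if bl < mctGM q pats then mctFind q (mctGM q pats) pats else bt := by
  induction pats with
  | nil =>
    intro bt bl hbl
    rw [List.foldl_nil, mctGM_nil, if_neg (by omega)]
  | cons tk rest ih =>
    intro bt bl hbl
    rw [mctGM_cons]
    simp only [List.foldl_cons]
    rw [mct_inner q tk.1 _ bt bl hbl,
      mctMM_perm q (PySem.List.sorted_perm tk.2 (fun kw => PySem.Str.len kw) true)]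
    have hmm := mctMM_nonneg q tk.2
    have hgm := mctGM_nonneg q rest
    by_cases hbig : bl < mctMM q tk.2
    · rw [if_pos hbig, ih tk.1 (mctMM q tk.2) hmm]
      by_cases hle : mctGM q rest ≤ mctMM q tk.2
      · rw [if_neg (show ¬ mctMM q tk.2 < mctGM q rest by omega),
          show max (mctMM q tk.2) (mctGM q rest) = mctMM q tk.2 by omega,
          if_pos (show bl < mctMM q tk.2 from hbig), mctFind_cons,
          if_pos (mct_any_attained q tk.2 (by omega))]
      · rw [if_pos (show mctMM q tk.2 < mctGM q rest by omega),
          show max (mctMM q tk.2) (mctGM q rest) = mctGM q rest by omega,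
          if_pos (show bl < mctGM q rest by omega), mctFind_cons,
          if_neg (show ¬ (tk.2.any fun kw =>
              PySem.Str.isIn kw q && decide (PySem.Str.len kw = mctGM q rest)) = true by
            intro hany
            have := mct_any_le q tk.2 _ hany
            omega)]
    · rw [if_neg hbig, ih bt bl hbl]
      by_cases hgt : bl < mctGM q rest
      · rw [if_pos hgt,
          show max (mctMM q tk.2) (mctGM q rest) = mctGM q rest by omega,
          if_pos (show bl < mctGM q rest from hgt), mctFind_cons,
          if_neg (show ¬ (tk.2.any fun kw =>
              PySem.Str.isIn kw q && decide (PySem.Str.len kw = mctGM q rest)) = true by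
            intro hany
            have := mct_any_le q tk.2 _ hany
            omega)]
      · rw [if_neg hgt, if_neg (show ¬ bl < max (mctMM q tk.2) (mctGM q rest) by omega)]

-- Source B's max(lens, default=0) equals the foldl-max characterisation mctGM
lemma mct_maxD_eq (q : String) (pats : List (String × List String)) :
    PySem.List.maxD (mctLens q pats) (fun x => x) 0 = mctGM q pats := by
  have hnn : ∀ x ∈ mctLens q pats, 0 ≤ x := by
    intro x hx
    unfold mctLens at hx
    simp only [List.mem_flatMap, List.mem_map, List.mem_filter] at hx
    obtain ⟨tk, _, kw, _, rfl⟩ := hx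
    exact mct_len_nonneg kw
  unfold mctGM
  cases hl : mctLens q pats with
  | nil => simp [PySem.List.maxD, PySem.List.max?]
  | cons x t =>
    rw [PySem.List.maxD, PySem.List.max?_id_cons, Option.getD_some, List.foldl_cons,
      show max 0 x = x by have := hnn x (by rw [hl]; exact List.mem_cons_self); omega]

-- ===== VERDICT (by name: the statement is the Claim_ definition above) =====
theorem match_chart_type_spec : Claim_equal_match_chart_type := by
  intro q pats _
  unfold Spec_match_chart_type match_chart_type match_chart_type_alt
  rw [mct_outer q pats "bar" 0 le_rfl, mct_maxD_eq]
  have := mctGM_nonneg q pats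
  by_cases h : mctGM q pats = 0
  · rw [if_neg (by omega), if_pos h]
  · rw [if_pos (by omega), if_neg h]
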